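-- pv_equiv track=rewrite | github.com/anuragb26/hello-world | pythonCourse/powerSet1.py | yieldAllCombos
-- ===== SOURCE A (Python) =====
-- def yieldAllCombos(items):
--     """
--         Generates all combinations of N items into two bags, whereby each
--         item is in one or zero bags.
--
--         Yields a tuple, (bag1, bag2), where each bag is represented as a list
--         of which item(s) are in each bag.
--     """
--     # Your code here
--     N=len(items)
--     for i in range(3**N):
--         result1=[]
--         result2=[]
--         for j in range(N):
--             if((i//3**j)%3==1):
--                 result1.append(items[j])
--             elif((i//3**j)%3==2):
--             	result2.append(items[j])
--         yield (result1,result2)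
-- ===== SOURCE B (Python) =====
-- def yieldAllCombos(items):
--     """
--         Generates all combinations of N items into two bags, whereby each
--         item is in one or zero bags.
--
--         Yields a tuple, (bag1, bag2), where each bag is represented as a list
--         of which item(s) are in each bag.
--     """
--     if not items:
--         yield ([], [])
--         return
--     first = items[0]
--     for bag1, bag2 in yieldAllCombos(items[1:]):
--         yield (bag1, bag2)
--         yield ([first] + bag1, bag2)
--         yield (bag1, [first] + bag2)
-- ===== Notes on version B (the rewrite author's own statement) =====
-- stated objective: alternative
-- what changed: Replaced the base-3 integer enumeration (outer loop over range(3**N) with an inner digit-decoding loop) by a recursive generator that extends each assignment of the tail with three choices for the head, keeping A's exact yield order.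
import Mathlib
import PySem

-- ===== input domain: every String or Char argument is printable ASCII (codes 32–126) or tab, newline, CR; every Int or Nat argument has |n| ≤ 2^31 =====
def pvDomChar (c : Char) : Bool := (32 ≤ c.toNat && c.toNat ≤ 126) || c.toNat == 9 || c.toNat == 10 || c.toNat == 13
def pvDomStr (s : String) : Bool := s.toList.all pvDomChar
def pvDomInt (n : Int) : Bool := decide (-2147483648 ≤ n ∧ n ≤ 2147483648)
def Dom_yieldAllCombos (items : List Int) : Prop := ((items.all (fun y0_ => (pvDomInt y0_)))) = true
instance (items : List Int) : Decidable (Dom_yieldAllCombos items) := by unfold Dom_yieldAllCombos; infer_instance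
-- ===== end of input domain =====

-- B replaces A's base-3 integer enumeration (range(3**N) decoded digit by digit) with a
-- recursive generator extending each tail assignment by three choices for the head;
-- same yield order, proved equal (objective: alternative).

-- ===== PORT A =====
-- inner loop body of A: digit j of i (base 3) decides where items[j] goes
-- (items[j] is always in range here, so pyGetD's default 0 is never used)
def decStepA (items : List Int) (i : Int) (st : List Int × List Int) (j : Int) :
    List Int × List Int :=
  if PySem.Int.mod (PySem.Int.floordiv i ((3:Int) ^ j.toNat)) 3 = 1 then
    (st.1 ++ [PySem.List.pyGetD items j 0], st.2)
  else if PySem.Int.mod (PySem.Int.floordiv i ((3:Int) ^ j.toNat)) 3 = 2 then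
    (st.1, st.2 ++ [PySem.List.pyGetD items j 0])
  else st

-- A's inner 'for j in range(N)' loop building (result1, result2) for one value of i
def decodeA (items : List Int) (i : Int) : List Int × List Int :=
  (PySem.List.pyRange 0 (items.length : Int) 1).foldl (decStepA items i) ([], [])

-- A's outer 'for i in range(3**N)' loop, collecting the yields in order
def yieldAllCombos (items : List Int) : List (List Int × List Int) :=
  (PySem.List.pyRange 0 ((3:Int) ^ items.length) 1).map (decodeA items)

-- ===== PORT B =====
def yieldAllCombos_alt : List Int → List (List Int × List Int)
  | [] => [([], [])]
  | first :: rest =>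
      (yieldAllCombos_alt rest).flatMap
        (fun p => [(p.1, p.2), (first :: p.1, p.2), (p.1, first :: p.2)])

-- ===== PRECONDITION & SPEC =====
def Spec_yieldAllCombos (items : List Int) (out : List (List Int × List Int)) : Prop := out = yieldAllCombos_alt items
instance (items : List Int) (out : List (List Int × List Int)) : Decidable (Spec_yieldAllCombos items out) := by unfold Spec_yieldAllCombos; infer_instance

-- ===== CLAIM (what is proved, stated in full; the proofs are below) =====
def Claim_equal_yieldAllCombos : Prop := ∀ (items : List Int), Dom_yieldAllCombos items → Spec_yieldAllCombos items (yieldAllCombos items)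

-- ===== LEMMAS AND PROOFS =====

-- digit j+1 of i equals digit j of i // 3 (and items shift by one)
lemma decStepA_shift (x : Int) (rest : List Int) (i : Int) (st : List Int × List Int)
    (k : Nat) :
    decStepA (x :: rest) i st (1 + (k : Int)) =
      decStepA rest (PySem.Int.floordiv i 3) st (k : Int) := by
  have htn : ((1 + (k : Int)).toNat) = 1 + k := by omega
  have hdiv : PySem.Int.floordiv i ((3:Int) ^ (1 + k)) =
      PySem.Int.floordiv (PySem.Int.floordiv i 3) ((3:Int) ^ k) := by
    rw [PySem.Int.floordiv_eq_ediv_of_pos (by positivity),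
        PySem.Int.floordiv_eq_ediv_of_pos (by norm_num),
        PySem.Int.floordiv_eq_ediv_of_pos (by positivity),
        Int.ediv_ediv_of_nonneg (by norm_num : (0:Int) ≤ 3), pow_add, pow_one]
  have hget : PySem.List.pyGetD (x :: rest) (1 + (k : Int)) 0 =
      PySem.List.pyGetD rest (k : Int) 0 := by
    have h1 : (1 + (k : Int)) = ((1 + k : Nat) : Int) := by push_cast; ring
    rw [h1, PySem.List.pyGetD_natCast, PySem.List.pyGetD_natCast, Nat.add_comm 1 k]
    simp [List.getD]
  simp only [decStepA, htn, hdiv, hget, Int.toNat_natCast]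
  rfl

-- the accumulator of A's inner loop only grows at the back
lemma foldl_decStepA_append (items : List Int) (i : Int) (L : List Int) :
    ∀ a b : List Int,
      L.foldl (decStepA items i) (a, b) =
        (a ++ (L.foldl (decStepA items i) ([], [])).1,
         b ++ (L.foldl (decStepA items i) ([], [])).2) := by
  induction L with
  | nil => simp
  | cons l L ih =>
    intro a b
    by_cases hc1 : PySem.Int.mod (PySem.Int.floordiv i ((3:Int) ^ l.toNat)) 3 = 1
    · have e1 : ∀ st : List Int × List Int,
          decStepA items i st l = (st.1 ++ [PySem.List.pyGetD items l 0], st.2) := by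
        intro st; simp only [decStepA]; rw [if_pos hc1]
      rw [List.foldl_cons, List.foldl_cons, e1, e1,
          ih (a ++ [PySem.List.pyGetD items l 0]) b,
          ih (([], []).1 ++ [PySem.List.pyGetD items l 0]) ([], []).2]
      simp
    · by_cases hc2 : PySem.Int.mod (PySem.Int.floordiv i ((3:Int) ^ l.toNat)) 3 = 2
      · have e2 : ∀ st : List Int × List Int,
            decStepA items i st l = (st.1, st.2 ++ [PySem.List.pyGetD items l 0]) := by
          intro st; simp only [decStepA]; rw [if_neg hc1, if_pos hc2]
        rw [List.foldl_cons, List.foldl_cons, e2, e2,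
            ih a (b ++ [PySem.List.pyGetD items l 0]),
            ih ([], []).1 (([], []).2 ++ [PySem.List.pyGetD items l 0])]
        simp
      · have e3 : ∀ st : List Int × List Int, decStepA items i st l = st := by
          intro st; simp only [decStepA]; rw [if_neg hc1]; exact if_neg hc2
        rw [List.foldl_cons, List.foldl_cons, e3, e3]
        exact ih a b

-- peel off digit 0: decode of (x :: rest) at i in terms of decode of rest at i // 3
lemma decodeA_cons (x : Int) (rest : List Int) (i : Int) :
    decodeA (x :: rest) i =
      ((if PySem.Int.mod i 3 = 1 then [x] else []) ++ (decodeA rest (PySem.Int.floordiv i 3)).1,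
       (if PySem.Int.mod i 3 = 2 then [x] else []) ++ (decodeA rest (PySem.Int.floordiv i 3)).2) := by
  have hrest : (List.range rest.length).foldl
      (fun (st : List Int × List Int) (k : Nat) =>
        decStepA rest (PySem.Int.floordiv i 3) st (k : Int)) ([], [])
      = decodeA rest (PySem.Int.floordiv i 3) := by
    unfold decodeA
    rw [PySem.List.pyRange_one, List.foldl_map]
    simp
  have htail : ∀ st : List Int × List Int,
      (PySem.List.pyRange 1 ((rest.length : Int) + 1) 1).foldl (decStepA (x :: rest) i) st
      = (List.range rest.length).foldl
          (fun (st : List Int × List Int) (k : Nat) =>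
            decStepA rest (PySem.Int.floordiv i 3) st (k : Int)) st := by
    intro st
    have hlen2 : (((rest.length : Int) + 1 - 1).toNat) = rest.length := by omega
    rw [PySem.List.pyRange_one, hlen2, List.foldl_map]
    congr 1
    funext st k
    exact decStepA_shift x rest i st k
  have hstep0 : decStepA (x :: rest) i (([], []) : List Int × List Int) 0 =
      (if PySem.Int.mod i 3 = 1 then ([x], ([] : List Int))
       else if PySem.Int.mod i 3 = 2 then (([] : List Int), [x]) else ([], [])) := by
    simp [decStepA]
  conv_lhs =>
    rw [decodeA,
      show (((x :: rest).length : Int)) = (rest.length : Int) + 1 from by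
        push_cast [List.length_cons]; ring,
      PySem.List.pyRange_one_cons (by positivity),
      show ((0:Int)+1) = 1 from by norm_num]
  simp only [List.foldl_cons, hstep0]
  split_ifs with h1 h2
  · rw [h1] at h2; norm_num at h2
  · rw [foldl_decStepA_append, htail, hrest]
    try simp
  · rw [foldl_decStepA_append, htail, hrest]
    try simp
  · rw [htail, hrest]
    try simp

-- List.range (3*m) grouped in threes
lemma range_three_mul (m : Nat) :
    List.range (3 * m) = (List.range m).flatMap (fun q => [3*q, 3*q+1, 3*q+2]) := by
  induction m with
  | zero => simp
  | succ m ih =>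
    have h : 3 * (m + 1) = (3 * m) + 1 + 1 + 1 := by ring
    rw [h, List.range_succ, List.range_succ, List.range_succ, ih, List.range_succ]
    simp

-- A's outer range, in Nat form
lemma yieldAllCombos_eq_range (items : List Int) :
    yieldAllCombos items =
      (List.range (3 ^ items.length)).map (fun (k : Nat) => decodeA items (k : Int)) := by
  unfold yieldAllCombos
  have h3 : ((3:Int) ^ items.length) = ((3 ^ items.length : Nat) : Int) := by push_cast; ring
  rw [h3, PySem.List.pyRange_one]
  simp [List.map_map, Function.comp_def]
  rw [show ((3:Int) ^ items.length).toNat = 3 ^ items.length from by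
        rw [show ((3:Int)) = ((3:Nat) : Int) from rfl, ← Nat.cast_pow, Int.toNat_natCast]]

lemma mod_three_shift (q : Nat) (r : Int) (h0 : 0 ≤ r) (h3 : r < 3) :
    PySem.Int.mod (3 * (q : Int) + r) 3 = r := by
  rw [PySem.Int.mod_eq_emod_of_pos (by norm_num)]
  omega

lemma div_three_shift (q : Nat) (r : Int) (h0 : 0 ≤ r) (h3 : r < 3) :
    PySem.Int.floordiv (3 * (q : Int) + r) 3 = (q : Int) := by
  rw [PySem.Int.floordiv_eq_ediv_of_pos (by norm_num)]
  omega

lemma decodeA_three0 (x : Int) (rest : List Int) (q : Nat) :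
    decodeA (x :: rest) ((3 * q : Nat) : Int) = decodeA rest (q : Int) := by
  rw [show (((3 * q : Nat) : Int)) = 3 * (q : Int) + 0 by push_cast; ring,
      decodeA_cons, mod_three_shift q 0 (by norm_num) (by norm_num),
      div_three_shift q 0 (by norm_num) (by norm_num)]
  simp

lemma decodeA_three1 (x : Int) (rest : List Int) (q : Nat) :
    decodeA (x :: rest) ((3 * q + 1 : Nat) : Int) =
      (x :: (decodeA rest (q : Int)).1, (decodeA rest (q : Int)).2) := by
  rw [show (((3 * q + 1 : Nat) : Int)) = 3 * (q : Int) + 1 by push_cast; ring,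
      decodeA_cons, mod_three_shift q 1 (by norm_num) (by norm_num),
      div_three_shift q 1 (by norm_num) (by norm_num)]
  simp

lemma decodeA_three2 (x : Int) (rest : List Int) (q : Nat) :
    decodeA (x :: rest) ((3 * q + 2 : Nat) : Int) =
      ((decodeA rest (q : Int)).1, x :: (decodeA rest (q : Int)).2) := by
  rw [show (((3 * q + 2 : Nat) : Int)) = 3 * (q : Int) + 2 by push_cast; ring,
      decodeA_cons, mod_three_shift q 2 (by norm_num) (by norm_num),
      div_three_shift q 2 (by norm_num) (by norm_num)]
  simp

lemma yieldAllCombos_eq_alt (items : List Int) :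
    yieldAllCombos items = yieldAllCombos_alt items := by
  induction items with
  | nil => decide
  | cons x rest ih =>
    rw [yieldAllCombos_eq_range]
    have hpow : 3 ^ (x :: rest).length = 3 * 3 ^ rest.length := by
      rw [List.length_cons, pow_succ]; ring
    rw [hpow, range_three_mul, List.map_flatMap]
    simp only [List.map_cons, List.map_nil,
      decodeA_three0, decodeA_three1, decodeA_three2]
    rw [show yieldAllCombos_alt (x :: rest) =
          (yieldAllCombos_alt rest).flatMap
            (fun p => [(p.1, p.2), (x :: p.1, p.2), (p.1, x :: p.2)]) from rfl,
        ← ih, yieldAllCombos_eq_range, List.flatMap_map]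

-- ===== VERDICT (by name: the statement is the Claim_ definition above) =====
theorem yieldAllCombos_spec : Claim_equal_yieldAllCombos := by
  intro items _
  unfold Spec_yieldAllCombos
  exact yieldAllCombos_eq_alt items
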